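-- pv_equiv track=rewrite | github.com/yashanand1910/solutions | algomonster/advanced-dsa/reverse_union_find.py | umbristan
-- ===== SOURCE A (Python) =====
-- from typing import List
--
-- class UnionFind:
--     def __init__(self):
--         self.id = {}
--
--     def find(self, x):
--         y = self.id.get(x, x)
--         if y != x:
--             self.id[x] = y = self.find(y)
--         return y
--
--     def union(self, x, y):
--         self.id[self.find(x)] = self.find(y)
--
-- def umbristan(n: int, breaks: List[List[int]]) -> List[int]:
--     length = len(breaks)
--     res = [0] * length
--     res[-1] = n
--     dsu = UnionFind()
--
--     for i in range(length - 1, 0, -1):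
--         if dsu.find(breaks[i][0]) != dsu.find(breaks[i][1]):
--             res[i - 1] = res[i] - 1
--         else:
--             res[i - 1] = res[i]
--         dsu.union(breaks[i][0], breaks[i][1])
--
--     return res
-- ===== SOURCE B (Python) =====
-- from typing import List
--
--
-- def umbristan(n: int, breaks: List[int]) -> List[int]:
--     # answer[j] = n minus the number of merging unions among the edges that
--     # remain after position j (the merge count does not depend on edge order;
--     # we scan each suffix back-to-front).
--     def merges(edges):
--         parent = {}
--
--         def find(x):
--             y = parent.get(x, x)
--             if y != x:
--                 parent[x] = y = find(y)
--             return y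
--
--         cnt = 0
--         for e in reversed(edges):
--             if find(e[0]) != find(e[1]):
--                 cnt += 1
--             parent[find(e[0])] = find(e[1])
--         return cnt
--
--     return [n - merges(breaks[j + 1:]) for j in range(len(breaks))]
-- ===== Notes on version B (the rewrite author's own statement) =====
-- stated objective: alternative
-- what changed: Replaces A's single reverse pass that threads one shared union-find and accumulates res[i-1] from res[i] with an independent per-index recomputation: answer[j] = n minus the merge count of a fresh union-find run over the suffix of edges after j.
import Mathlib
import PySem

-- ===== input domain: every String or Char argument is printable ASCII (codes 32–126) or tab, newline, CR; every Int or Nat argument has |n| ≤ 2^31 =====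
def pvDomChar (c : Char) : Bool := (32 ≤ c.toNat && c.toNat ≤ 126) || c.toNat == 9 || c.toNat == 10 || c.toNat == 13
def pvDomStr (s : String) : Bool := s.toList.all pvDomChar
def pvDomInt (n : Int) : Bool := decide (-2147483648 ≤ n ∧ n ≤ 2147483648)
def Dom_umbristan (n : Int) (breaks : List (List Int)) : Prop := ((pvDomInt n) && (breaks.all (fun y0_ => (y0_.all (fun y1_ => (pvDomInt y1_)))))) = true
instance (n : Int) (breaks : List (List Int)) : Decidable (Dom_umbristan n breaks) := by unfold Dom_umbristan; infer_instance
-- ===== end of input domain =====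

-- B replaces A's single reverse accumulating DSU pass by an independent
-- per-index recomputation: answer[j] = n minus the merge count of a fresh
-- union-find run over the suffix of edges after j (alternative decomposition,
-- not faster). Return-value equivalence only; neither program mutates its input.

-- ===== PORT A =====
-- UnionFind.find with path compression; the fuel (dict size + 1) is only a
-- totality guard: a parent chain visits distinct keys, so it never runs out.
def ufFind : Nat → PySem.Dict Int Int → Int → Int × PySem.Dict Int Int
  | 0, d, x => (x, d)
  | fuel + 1, d, x =>
    let y := d.getD x x
    if y = x then (x, d)
    else
      let (r, d') := ufFind fuel d y
      (r, d'.insert x r)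

-- one iteration of A's loop body on the dsu: the two finds of the test,
-- then union(a, b) = id[find(a)] = find(b); returns (roots differed?, new dsu)
def edgeJoin (dsu : PySem.Dict Int Int) (e : List Int) : Bool × PySem.Dict Int Int :=
  let a := PySem.List.pyGetD e 0 0
  let b := PySem.List.pyGetD e 1 0
  let (r1, dsu) := ufFind (dsu.items.length + 1) dsu a
  let (r2, dsu) := ufFind (dsu.items.length + 1) dsu b
  let (x, dsu) := ufFind (dsu.items.length + 1) dsu a
  let (y, dsu) := ufFind (dsu.items.length + 1) dsu b
  (decide (r1 ≠ r2), dsu.insert x y)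

def umbristan (n : Int) (breaks : List (List Int)) : List Int :=
  let length : Int := breaks.length
  let res : List Int := List.replicate breaks.length 0
  let res : List Int := PySem.List.pySetD res (-1) n
  let st :=
    (PySem.List.pyRange (length - 1) 0 (-1)).foldl
      (fun (st : List Int × PySem.Dict Int Int) i =>
        let (res, dsu) := st
        let (b, dsu) := edgeJoin dsu (PySem.List.pyGetD breaks i [])
        let res :=
          if b then PySem.List.pySetD res (i - 1) (PySem.List.pyGetD res i 0 - 1)
          else PySem.List.pySetD res (i - 1) (PySem.List.pyGetD res i 0)
        (res, dsu))
      (res, PySem.Dict.empty)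
  st.1

-- ===== PORT B =====
-- merge count of a fresh union-find over an edge list, scanned back-to-front
def ufMerges (edges : List (List Int)) : Int :=
  (edges.reverse.foldl
    (fun (st : PySem.Dict Int Int × Int) e =>
      let (parent, cnt) := st
      let (b, parent) := edgeJoin parent e
      (parent, if b then cnt + 1 else cnt))
    (PySem.Dict.empty, 0)).2

def umbristan_alt (n : Int) (breaks : List (List Int)) : List Int :=
  (List.range breaks.length).map
    (fun (j : Nat) => n - ufMerges (PySem.List.slice breaks (some ((j : Int) + 1)) none))

-- ===== PRECONDITION & SPEC =====
-- Pre_ excludes exactly the inputs on which Python A raises IndexError: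
-- empty breaks (res[-1] = n on an empty list) and an edge after position 0
-- with fewer than two entries (breaks[i][0] / breaks[i][1]); breaks[0] itself
-- is never indexed by A, so its shape is unconstrained.
def Pre_umbristan (n : Int) (breaks : List (List Int)) : Prop :=
  breaks ≠ [] ∧ ∀ e ∈ breaks.tail, 2 ≤ e.length
instance (n : Int) (breaks : List (List Int)) : Decidable (Pre_umbristan n breaks) := by
  unfold Pre_umbristan; infer_instance

def pvWitness_umbristan : Int × List (List Int) := (4, [[0, 1], [1, 2], [0, 2]])

def Spec_umbristan (n : Int) (breaks : List (List Int)) (out : List Int) : Prop := out = umbristan_alt n breaks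
instance (n : Int) (breaks : List (List Int)) (out : List Int) : Decidable (Spec_umbristan n breaks out) := by unfold Spec_umbristan; infer_instance

-- ===== CLAIM (what is proved, stated in full; the proofs are below) =====
def Claim_equal_umbristan : Prop := ∀ (n : Int) (breaks : List (List Int)), Dom_umbristan n breaks → Pre_umbristan n breaks → Spec_umbristan n breaks (umbristan n breaks)


-- ===== LEMMAS AND PROOFS =====

-- dsu-and-count state after running edgeJoin over the suffix breaks.drop j,
-- scanned back-to-front (the common processing order of both programs)
def runFrom (breaks : List (List Int)) (j : Nat) : PySem.Dict Int Int × Int :=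
  (breaks.drop j).reverse.foldl
    (fun (st : PySem.Dict Int Int × Int) e =>
      let (parent, cnt) := st
      let (b, parent) := edgeJoin parent e
      (parent, if b then cnt + 1 else cnt))
    (PySem.Dict.empty, 0)

-- the body of A's loop, named for the proofs
def stepA (n : Int) (breaks : List (List Int)) (st : List Int × PySem.Dict Int Int) (i : Int) :
    List Int × PySem.Dict Int Int :=
  let (res, dsu) := st
  let (b, dsu) := edgeJoin dsu (PySem.List.pyGetD breaks i [])
  let res :=
    if b then PySem.List.pySetD res (i - 1) (PySem.List.pyGetD res i 0 - 1)
    else PySem.List.pySetD res (i - 1) (PySem.List.pyGetD res i 0)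
  (res, dsu)

lemma umbristan_eq_fold (n : Int) (breaks : List (List Int)) :
    umbristan n breaks =
      ((PySem.List.pyRange ((breaks.length : Int) - 1) 0 (-1)).foldl (stepA n breaks)
        (PySem.List.pySetD (List.replicate breaks.length 0) (-1) n, PySem.Dict.empty)).1 := rfl

lemma stepA_eval (n : Int) (breaks : List (List Int)) (res : List Int)
    (dsu : PySem.Dict Int Int) (i : Int) :
    stepA n breaks (res, dsu) i =
      ((if (edgeJoin dsu (PySem.List.pyGetD breaks i [])).1
        then PySem.List.pySetD res (i - 1) (PySem.List.pyGetD res i 0 - 1)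
        else PySem.List.pySetD res (i - 1) (PySem.List.pyGetD res i 0)),
       (edgeJoin dsu (PySem.List.pyGetD breaks i [])).2) := rfl

lemma ufMerges_eq_runFrom (breaks : List (List Int)) (j : Nat) :
    ufMerges (breaks.drop j) = (runFrom breaks j).2 := rfl

lemma runFrom_length (breaks : List (List Int)) :
    runFrom breaks breaks.length = (PySem.Dict.empty, 0) := by
  unfold runFrom
  simp

lemma runFrom_succ (breaks : List (List Int)) (j : Nat) (hj : j < breaks.length) :
    runFrom breaks j =
      ((edgeJoin (runFrom breaks (j + 1)).1 breaks[j]).2,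
       if (edgeJoin (runFrom breaks (j + 1)).1 breaks[j]).1
       then (runFrom breaks (j + 1)).2 + 1 else (runFrom breaks (j + 1)).2) := by
  conv_lhs => rw [runFrom, List.drop_eq_getElem_cons hj]
  rw [List.reverse_cons, List.foldl_concat]
  rfl

lemma pySetD_neg_one' {α : Type} (xs : List α) (v : α) (h : xs ≠ []) :
    PySem.List.pySetD xs (-1) v = xs.set (xs.length - 1) v := by
  have hl : 0 < xs.length := List.length_pos_iff.mpr h
  simp only [PySem.List.pySetD, PySem.List.pySet?, PySem.List.pyIdx?]
  rw [if_neg (by omega), if_pos (by omega)]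
  norm_num

lemma getD_set' {α : Type} [Inhabited α] (xs : List α) (i j : Nat) (v d : α) :
    (xs.set i v).getD j d = if i = j ∧ j < xs.length then v else xs.getD j d := by
  simp [List.getD_eq_getElem?_getD, List.getElem?_set]
  split_ifs <;> simp_all

lemma loopA (n : Int) (breaks : List (List Int)) (m : Nat) (hm : m < breaks.length)
    (res : List Int) (hlen : res.length = breaks.length)
    (hres : ∀ j : Nat, m ≤ j → j < breaks.length →
      res.getD j 0 = n - (runFrom breaks (j + 1)).2) :
    (((PySem.List.pyRange (m : Int) 0 (-1)).foldl (stepA n breaks)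
        (res, (runFrom breaks (m + 1)).1)).1.length = breaks.length) ∧
    (∀ j : Nat, j < breaks.length →
      ((PySem.List.pyRange (m : Int) 0 (-1)).foldl (stepA n breaks)
        (res, (runFrom breaks (m + 1)).1)).1.getD j 0 = n - (runFrom breaks (j + 1)).2) := by
  induction m generalizing res with
  | zero =>
    rw [PySem.List.pyRange_neg_one_eq_nil (by norm_num)]
    exact ⟨hlen, fun j hj => hres j (Nat.zero_le j) hj⟩
  | succ m ih =>
    rw [PySem.List.pyRange_neg_one_cons (by exact_mod_cast Nat.succ_pos m)]
    rw [List.foldl_cons, stepA_eval]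
    have hcast : ((m + 1 : Nat) : Int) - 1 = (m : Int) := by push_cast; ring
    rw [hcast]
    have hedge : PySem.List.pyGetD breaks ((m + 1 : Nat) : Int) [] = breaks[m + 1] := by
      rw [PySem.List.pyGetD_natCast, List.getD_eq_getElem _ _ hm]
    have hget : PySem.List.pyGetD res ((m + 1 : Nat) : Int) 0 = n - (runFrom breaks (m + 2)).2 := by
      rw [PySem.List.pyGetD_natCast]
      exact hres (m + 1) (le_refl _) hm
    rw [hedge, hget, PySem.List.pySetD_natCast, PySem.List.pySetD_natCast]
    have hrun := runFrom_succ breaks (m + 1) hm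
    set eb := edgeJoin (runFrom breaks (m + 1 + 1)).1 breaks[m + 1] with heb
    have h1 : eb.2 = (runFrom breaks (m + 1)).1 := by rw [hrun]
    have h2 : (runFrom breaks (m + 1)).2 =
        if eb.1 then (runFrom breaks (m + 2)).2 + 1 else (runFrom breaks (m + 2)).2 := by
      rw [hrun]
    set res' : List Int :=
      if eb.1 then res.set m (n - (runFrom breaks (m + 2)).2 - 1)
      else res.set m (n - (runFrom breaks (m + 2)).2) with hres'
    have hlen' : res'.length = breaks.length := by
      rw [hres']; split <;> simpa using hlen
    have hset : res' = res.set m (n - (runFrom breaks (m + 1)).2) := by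
      rw [hres', h2]; split <;> ring_nf
    have hresm : ∀ j : Nat, m ≤ j → j < breaks.length →
        res'.getD j 0 = n - (runFrom breaks (j + 1)).2 := by
      intro j hmj hjL
      rw [hset, getD_set']
      rcases Nat.eq_or_lt_of_le hmj with h | h
      · rw [if_pos ⟨h, by omega⟩, h]
      · rw [if_neg (by omega)]
        exact hres j h hjL
    rw [h1]
    exact ih (by omega) res' hlen' hresm

lemma alt_getD (n : Int) (breaks : List (List Int)) (j : Nat) (hj : j < breaks.length) :
    (umbristan_alt n breaks).getD j 0 = n - (runFrom breaks (j + 1)).2 := by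
  unfold umbristan_alt
  rw [List.getD_eq_getElem _ _ (by simpa using hj)]
  simp only [List.getElem_map, List.getElem_range]
  have hc : ((j : Int) + 1) = ((j + 1 : Nat) : Int) := by push_cast; ring
  rw [hc, PySem.List.slice_from_natCast, ufMerges_eq_runFrom]

lemma alt_length (n : Int) (breaks : List (List Int)) :
    (umbristan_alt n breaks).length = breaks.length := by
  unfold umbristan_alt; simp

-- ===== VERDICT (by name: the statement is the Claim_ definition above) =====
theorem umbristan_spec : Claim_equal_umbristan := by
  intro n breaks _ hpre
  unfold Spec_umbristan
  obtain ⟨hne, -⟩ := hpre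
  have hL : 0 < breaks.length := List.length_pos_iff.mpr hne
  rw [umbristan_eq_fold]
  have hcast : ((breaks.length : Int) - 1) = ((breaks.length - 1 : Nat) : Int) := by
    rw [Nat.cast_sub hL]; ring
  have hrepl : (List.replicate breaks.length (0 : Int)) ≠ [] := by
    simp [List.replicate_eq_nil_iff]; omega
  rw [hcast, pySetD_neg_one' _ _ hrepl, List.length_replicate]
  have hmm : breaks.length - 1 + 1 = breaks.length := by omega
  have hdsu : (PySem.Dict.empty : PySem.Dict Int Int)
      = (runFrom breaks (breaks.length - 1 + 1)).1 := by
    rw [hmm, runFrom_length]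
  have hres0 : ∀ j : Nat, breaks.length - 1 ≤ j → j < breaks.length →
      ((List.replicate breaks.length (0 : Int)).set (breaks.length - 1) n).getD j 0
        = n - (runFrom breaks (j + 1)).2 := by
    intro j h1 h2
    have hj : j = breaks.length - 1 := by omega
    subst hj
    rw [getD_set', if_pos ⟨rfl, by simpa using h2⟩, hmm, runFrom_length]
    ring
  rw [hdsu]
  obtain ⟨hlen, hget⟩ := loopA n breaks (breaks.length - 1) (by omega) _
    (by simp) hres0
  apply List.ext_getElem (by rw [hlen, alt_length])
  intro i h1 h2
  have hiL : i < breaks.length := by omega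
  have hv := hget i hiL
  rw [List.getD_eq_getElem _ _ h1] at hv
  rw [hv, ← alt_getD n breaks i hiL, List.getD_eq_getElem _ _ h2]
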